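-- pv_equiv track=rewrite | github.com/dltkdwns0730/PAZULE_AGENT | scripts/tools/supabase_runtime_verify.py | select_client_api_key
-- ===== SOURCE A (Python) =====
-- from typing import Any
--
-- def select_client_api_key(api_keys: list[dict[str, Any]]) -> str:
--     """Choose a browser-safe Supabase API key from Management API records."""
--     publishable: list[str] = []
--     legacy_anon: list[str] = []
--     for api_key in api_keys:
--         value = str(api_key.get("api_key") or "")
--         if not value:
--             continue
--         key_type = str(api_key.get("type") or "").lower()
--         name = str(api_key.get("name") or "").lower()
--         prefix = str(api_key.get("prefix") or "").lower()
--         if value.startswith("sb_publishable_") or key_type == "publishable":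
--             publishable.append(value)
--         elif name == "anon" or prefix == "anon":
--             legacy_anon.append(value)
--     if publishable:
--         return publishable[0]
--     if legacy_anon:
--         return legacy_anon[0]
--     raise RuntimeError("No publishable or legacy anon Supabase API key was returned.")
-- ===== SOURCE B (Python) =====
-- def select_client_api_key(api_keys: list[dict[str, object]]) -> str:
--     """Choose a browser-safe Supabase API key from Management API records."""
--     publishable = next(
--         (v for ak in api_keys
--          if (v := str(ak.get("api_key") or ""))
--          and (v.startswith("sb_publishable_")
--               or str(ak.get("type") or "").lower() == "publishable")),
--         None,
--     )
--     if publishable: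
--         return publishable
--     legacy = next(
--         (v for ak in api_keys
--          if (v := str(ak.get("api_key") or ""))
--          and (str(ak.get("name") or "").lower() == "anon"
--               or str(ak.get("prefix") or "").lower() == "anon")),
--         None,
--     )
--     if legacy:
--         return legacy
--     raise RuntimeError("No publishable or legacy anon Supabase API key was returned.")
-- ===== Notes on version B (the rewrite author's own statement) =====
-- stated objective: idiomatic
-- what changed: Replaces the single loop that partitions keys into two accumulated lists (then returns the head of one) with two independent first-match next() scans in priority order, with no intermediate lists.
import Mathlib
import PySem

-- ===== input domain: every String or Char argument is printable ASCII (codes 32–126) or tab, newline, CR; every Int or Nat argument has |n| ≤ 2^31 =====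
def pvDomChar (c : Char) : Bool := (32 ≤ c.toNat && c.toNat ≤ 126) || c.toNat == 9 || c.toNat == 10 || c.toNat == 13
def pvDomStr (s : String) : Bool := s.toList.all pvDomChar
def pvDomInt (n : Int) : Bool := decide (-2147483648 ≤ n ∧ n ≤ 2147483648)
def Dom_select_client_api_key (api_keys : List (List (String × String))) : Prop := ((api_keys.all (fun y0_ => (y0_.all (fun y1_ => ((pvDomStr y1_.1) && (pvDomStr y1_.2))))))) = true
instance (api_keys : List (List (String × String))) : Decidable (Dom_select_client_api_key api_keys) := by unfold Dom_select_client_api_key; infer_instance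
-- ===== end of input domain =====

-- B replaces A's single partitioning loop (two accumulated lists, then head of one) with two
-- independent first-match scans in priority order (idiomatic `next()` form); same return value.
-- On inputs where A raises RuntimeError (no matching key) both Pythons raise; Pre_ excludes them.

-- ===== PORT A =====
-- value = str(api_key.get("api_key") or "")
def pvAkGet (ak : List (String × String)) (k : String) : String :=
  ((PySem.Dict.mk ak).get? k).getD ""

-- the for-loop of A, accumulating the two lists `publishable` and `legacy_anon`
def pvSelLoop : List (List (String × String)) → List String → List String → List String × List String
  | [], pubs, legs => (pubs, legs)
  | ak :: rest, pubs, legs =>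
    let value := pvAkGet ak "api_key"
    if value = "" then pvSelLoop rest pubs legs
    else
      let keyType := PySem.Str.lower (pvAkGet ak "type")
      let name := PySem.Str.lower (pvAkGet ak "name")
      let pfx := PySem.Str.lower (pvAkGet ak "prefix")
      if PySem.Str.startswith value "sb_publishable_" = true ∨ keyType = "publishable" then
        pvSelLoop rest (pubs ++ [value]) legs
      else if name = "anon" ∨ pfx = "anon" then
        pvSelLoop rest pubs (legs ++ [value])
      else pvSelLoop rest pubs legs

def select_client_api_key (api_keys : List (List (String × String))) : String :=
  let r := pvSelLoop api_keys [] []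
  match r.1 with
  | v :: _ => v
  | [] =>
    match r.2 with
    | v :: _ => v
    | [] => ""   -- Python raises RuntimeError here; excluded by Pre_

-- ===== PORT B =====
-- first generator scan: first non-empty value that is publishable
def pvFindPub : List (List (String × String)) → Option String
  | [] => none
  | ak :: rest =>
    let v := pvAkGet ak "api_key"
    if v ≠ "" ∧ (PySem.Str.startswith v "sb_publishable_" = true ∨
                 PySem.Str.lower (pvAkGet ak "type") = "publishable") then
      some v
    else pvFindPub rest

-- second generator scan: first non-empty value with legacy anon name/prefix
def pvFindAnon : List (List (String × String)) → Option String
  | [] => none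
  | ak :: rest =>
    let v := pvAkGet ak "api_key"
    if v ≠ "" ∧ (PySem.Str.lower (pvAkGet ak "name") = "anon" ∨
                 PySem.Str.lower (pvAkGet ak "prefix") = "anon") then
      some v
    else pvFindAnon rest

def select_client_api_key_alt (api_keys : List (List (String × String))) : String :=
  match pvFindPub api_keys with
  | some v => v
  | none =>
    match pvFindAnon api_keys with
    | some v => v
    | none => ""   -- Python raises RuntimeError here; excluded by Pre_

-- ===== PRECONDITION & SPEC =====
-- Pre_ holds exactly when some record yields a key: otherwise Python A (and B) raises RuntimeError.
def Pre_select_client_api_key (api_keys : List (List (String × String))) : Prop :=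
  (api_keys.any (fun ak =>
    let v := pvAkGet ak "api_key"
    v ≠ "" && (PySem.Str.startswith v "sb_publishable_" ||
               PySem.Str.lower (pvAkGet ak "type") == "publishable" ||
               PySem.Str.lower (pvAkGet ak "name") == "anon" ||
               PySem.Str.lower (pvAkGet ak "prefix") == "anon"))) = true
instance (api_keys : List (List (String × String))) : Decidable (Pre_select_client_api_key api_keys) := by unfold Pre_select_client_api_key; infer_instance

def pvWitness_select_client_api_key : (List (List (String × String))) :=
  [[("api_key", "sb_publishable_abc")]]

def Spec_select_client_api_key (api_keys : List (List (String × String))) (out : String) : Prop := out = select_client_api_key_alt api_keys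
instance (api_keys : List (List (String × String))) (out : String) : Decidable (Spec_select_client_api_key api_keys out) := by unfold Spec_select_client_api_key; infer_instance

-- ===== CLAIM (what is proved, stated in full; the proofs are below) =====
def Claim_equal_select_client_api_key : Prop := ∀ (api_keys : List (List (String × String))), Dom_select_client_api_key api_keys → Pre_select_client_api_key api_keys → Spec_select_client_api_key api_keys (select_client_api_key api_keys)

-- ===== LEMMAS AND PROOFS =====

-- the loop only appends to its accumulators
theorem pvSelLoop_acc (l : List (List (String × String))) (pubs legs : List String) :
    pvSelLoop l pubs legs =
      (pubs ++ (pvSelLoop l [] []).1, legs ++ (pvSelLoop l [] []).2) := by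
  induction l generalizing pubs legs with
  | nil => simp [pvSelLoop]
  | cons ak rest ih =>
    simp only [pvSelLoop]
    split_ifs with h1 h2 h3
    · exact ih pubs legs
    · simp only [List.nil_append]; rw [ih (pubs ++ _) legs, ih [_] []]; simp
    · simp only [List.nil_append]; rw [ih pubs (legs ++ _), ih [] [_]]; simp
    · exact ih pubs legs

-- heads of the accumulated lists are B's two first-match scans
theorem pvSelLoop_heads (l : List (List (String × String))) :
    (pvSelLoop l [] []).1.head? = pvFindPub l ∧
    (pvFindPub l = none → (pvSelLoop l [] []).2.head? = pvFindAnon l) := by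
  induction l with
  | nil => simp [pvSelLoop, pvFindPub, pvFindAnon]
  | cons ak rest ih =>
    simp only [pvSelLoop, pvFindPub, pvFindAnon, List.nil_append]
    by_cases hv : pvAkGet ak "api_key" = ""
    · simp [hv]; exact ih
    · by_cases hp : PySem.Str.startswith (pvAkGet ak "api_key") "sb_publishable_" = true ∨
          PySem.Str.lower (pvAkGet ak "type") = "publishable"
      · rw [if_neg hv, if_pos hp, if_pos (And.intro hv hp)]
        constructor
        · rw [pvSelLoop_acc rest [_] []]; simp
        · intro h; simp at h
      · by_cases ha : PySem.Str.lower (pvAkGet ak "name") = "anon" ∨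
            PySem.Str.lower (pvAkGet ak "prefix") = "anon"
        · rw [if_neg hv, if_neg hp, if_pos ha,
            if_neg (fun h : _ ∧ _ => hp h.2), if_pos (And.intro hv ha)]
          rw [pvSelLoop_acc rest [] [_]]
          refine ⟨by simpa using ih.1, fun hn => ?_⟩
          have : (pvSelLoop rest [] []).1 = [] := by
            have h1 := ih.1; rw [hn] at h1; exact List.head?_eq_none_iff.mp h1
          simp
        · rw [if_neg hv, if_neg hp, if_neg ha,
            if_neg (fun h : _ ∧ _ => hp h.2), if_neg (fun h : _ ∧ _ => ha h.2)]
          exact ih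

-- ===== VERDICT (by name: the statement is the Claim_ definition above) =====
theorem select_client_api_key_spec : Claim_equal_select_client_api_key := by
  intro api_keys _ _
  unfold Spec_select_client_api_key select_client_api_key select_client_api_key_alt
  obtain ⟨h1, h2⟩ := pvSelLoop_heads api_keys
  cases hp : pvFindPub api_keys with
  | some v =>
    rw [hp] at h1
    obtain ⟨t, ht⟩ : ∃ t, (pvSelLoop api_keys [] []).1 = v :: t := by
      cases hl : (pvSelLoop api_keys [] []).1 with
      | nil => rw [hl] at h1; simp at h1
      | cons a t => rw [hl] at h1; simp at h1; exact ⟨t, by rw [h1]⟩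
    simp [ht]
  | none =>
    rw [hp] at h1
    have hnil : (pvSelLoop api_keys [] []).1 = [] := List.head?_eq_none_iff.mp h1
    have h2' := h2 hp
    cases ha : pvFindAnon api_keys with
    | some v =>
      rw [ha] at h2'
      obtain ⟨t, ht⟩ : ∃ t, (pvSelLoop api_keys [] []).2 = v :: t := by
        cases hl : (pvSelLoop api_keys [] []).2 with
        | nil => rw [hl] at h2'; simp at h2'
        | cons a t => rw [hl] at h2'; simp at h2'; exact ⟨t, by rw [h2']⟩
      simp [hnil, ht]
    | none =>
      rw [ha] at h2'
      have : (pvSelLoop api_keys [] []).2 = [] := List.head?_eq_none_iff.mp h2'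
      simp [hnil, this]
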